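-- pv_equiv track=rewrite | github.com/mr-mateusz/advent-of-code-2024 | day_14/solution.py | find_longest_robot_vertical_line
-- ===== SOURCE A (Python) =====
-- def find_longest_line(vals: list[int]) -> int:
--     if not vals:
--         return 0
--     last_val = vals[0]
--     longest_line = 0
--     current_line = 1
--     for val in vals[1:]:
--         if val == last_val + 1:
--             current_line += 1
--         else:
--             if current_line > longest_line:
--                 longest_line = current_line
--             current_line = 1
--         last_val = val
--     if current_line > longest_line:
--         longest_line = current_line
--     return longest_line
--
-- def find_longest_robot_vertical_line(positions: list[tuple], shape: tuple) -> int: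
--     n_cols = shape[1]
--     longest_line = 0
--     for i in range(n_cols):
--         vals_in_col = [p[0] for p in positions if p[1] == i]
--         vals_in_col = sorted(vals_in_col)
--         longest_col_line = find_longest_line(vals_in_col)
--         if longest_col_line > longest_line:
--             longest_line = longest_col_line
--     return longest_line
-- ===== SOURCE B (Python) =====
-- def find_longest_robot_vertical_line(positions, shape):
--     n_cols = shape[1]
--     pts = [(p[1], p[0]) for p in positions if 0 <= p[1] < n_cols]
--     buckets = {}
--     for c, r in pts:
--         buckets.setdefault(c, []).append(r)
--     best = 0
--     for rows in buckets.values():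
--         rows.sort()
--         prev = rows[0]
--         streak = longest = 1
--         for v in rows[1:]:
--             if v == prev + 1:
--                 streak += 1
--                 if streak > longest:
--                     longest = streak
--             else:
--                 streak = 1
--             prev = v
--         if longest > best:
--             best = longest
--     return best
-- ===== Notes on version B (the rewrite author's own statement) =====
-- stated objective: faster
-- what changed: Instead of scanning all positions once per column index in range(n_cols) (O(n_cols*n)), B buckets the in-range positions by column into a dict in one pass and then sorts and scans each bucket, so columns without robots are never visited.
-- outside the precondition, e.g. on find_longest_robot_vertical_line([(1,)], (5, 0)): A returns 0, B raises IndexError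
import Mathlib
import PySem

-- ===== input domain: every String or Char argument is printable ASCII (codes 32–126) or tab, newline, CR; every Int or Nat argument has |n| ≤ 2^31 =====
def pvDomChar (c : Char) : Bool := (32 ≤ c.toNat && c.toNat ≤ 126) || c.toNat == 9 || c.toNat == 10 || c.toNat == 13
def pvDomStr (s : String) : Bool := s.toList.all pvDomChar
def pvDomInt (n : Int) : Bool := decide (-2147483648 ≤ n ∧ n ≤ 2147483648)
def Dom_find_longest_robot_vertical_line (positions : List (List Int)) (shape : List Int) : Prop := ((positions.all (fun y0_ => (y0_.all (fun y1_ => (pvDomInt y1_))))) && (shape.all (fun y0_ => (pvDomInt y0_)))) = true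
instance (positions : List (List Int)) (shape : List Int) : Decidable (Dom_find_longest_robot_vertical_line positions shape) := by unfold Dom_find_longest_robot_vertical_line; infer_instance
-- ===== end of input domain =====

-- B buckets the in-range positions by column into a dict in one pass and then sorts and scans
-- each bucket, instead of A's scan of all positions once per column index in range(n_cols).

-- ===== PORT A =====
def find_longest_line (vals : List Int) : Int :=
  match vals with
  | [] => 0
  | v0 :: rest =>
    let st := rest.foldl (fun (s : Int × Int × Int) val =>
      if val = s.1 + 1 then (val, s.2.1, s.2.2 + 1)
      else (val, if s.2.2 > s.2.1 then s.2.2 else s.2.1, 1)) (v0, 0, 1)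
    if st.2.2 > st.2.1 then st.2.2 else st.2.1

def find_longest_robot_vertical_line (positions : List (List Int)) (shape : List Int) : Int :=
  let n_cols := PySem.List.pyGetD shape 1 0   -- shape[1]; Pre_ guarantees the index is in range
  (PySem.List.pyRange 0 n_cols 1).foldl (fun longest i =>
    let vals_in_col := (positions.filter (fun p => PySem.List.pyGetD p 1 0 == i)).map
        (fun p => PySem.List.pyGetD p 0 0)
    let vals_in_col := PySem.List.sorted vals_in_col (fun x => x) false
    let longest_col_line := find_longest_line vals_in_col
    if longest_col_line > longest then longest_col_line else longest) 0

-- ===== PORT B =====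
def find_longest_robot_vertical_line_alt (positions : List (List Int)) (shape : List Int) : Int :=
  let n_cols := PySem.List.pyGetD shape 1 0   -- shape[1]; Pre_ guarantees the index is in range
  let pts := (positions.filter (fun p =>
      decide (0 ≤ PySem.List.pyGetD p 1 0 ∧ PySem.List.pyGetD p 1 0 < n_cols))).map
      (fun p => (PySem.List.pyGetD p 1 0, PySem.List.pyGetD p 0 0))
  let buckets := pts.foldl (fun (d : PySem.Dict Int (List Int)) q =>
      d.modify q.1 [] (fun x => x ++ [q.2])) PySem.Dict.empty   -- setdefault(c, []).append(r)
  buckets.values.foldl (fun best rows =>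
    match PySem.List.sorted rows (fun x => x) false with
    | [] => best   -- unreachable: every bucket is nonempty (Python would raise on rows[0])
    | v0 :: rest =>
      let st := rest.foldl (fun (s : Int × Int × Int) v =>
        if v = s.1 + 1 then (v, if s.2.2 + 1 > s.2.1 then s.2.2 + 1 else s.2.1, s.2.2 + 1)
        else (v, s.2.1, 1)) (v0, 1, 1)
      if st.2.1 > best then st.2.1 else best) 0

-- ===== PRECONDITION & SPEC =====
-- Pre_ excludes the inputs on which Python raises IndexError: shape shorter than 2, or a position
-- tuple shorter than 2. (When shape[1] ≤ 0, A happens to return 0 without inspecting positions,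
-- so Pre_ also excludes short position tuples there, where B's bucketing pass raises.)
def Pre_find_longest_robot_vertical_line (positions : List (List Int)) (shape : List Int) : Prop :=
  2 ≤ shape.length ∧ ∀ p ∈ positions, 2 ≤ p.length
instance (positions : List (List Int)) (shape : List Int) : Decidable (Pre_find_longest_robot_vertical_line positions shape) := by unfold Pre_find_longest_robot_vertical_line; infer_instance
def pvWitness_find_longest_robot_vertical_line : List (List Int) × List Int :=
  ([[1, 0], [2, 0], [4, 0], [3, 2]], [6, 3])

def Spec_find_longest_robot_vertical_line (positions : List (List Int)) (shape : List Int) (out : Int) : Prop := out = find_longest_robot_vertical_line_alt positions shape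
instance (positions : List (List Int)) (shape : List Int) (out : Int) : Decidable (Spec_find_longest_robot_vertical_line positions shape out) := by unfold Spec_find_longest_robot_vertical_line; infer_instance

-- ===== CLAIM (what is proved, stated in full; the proofs are below) =====
def Claim_equal_find_longest_robot_vertical_line : Prop := ∀ (positions : List (List Int)) (shape : List Int), Dom_find_longest_robot_vertical_line positions shape → Pre_find_longest_robot_vertical_line positions shape → Spec_find_longest_robot_vertical_line positions shape (find_longest_robot_vertical_line positions shape)

-- ===== LEMMAS AND PROOFS =====

-- A's per-column value: the longest consecutive run in the sorted row list of column i.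
def pvColRows (positions : List (List Int)) (i : Int) : List Int :=
  (positions.filter (fun p => PySem.List.pyGetD p 1 0 == i)).map (fun p => PySem.List.pyGetD p 0 0)

def pvF (positions : List (List Int)) (i : Int) : Int :=
  find_longest_line (PySem.List.sorted (pvColRows positions i) (fun x => x) false)

lemma pv_if_max (a b : Int) : (if b > a then b else a) = max a b := by
  rw [max_def]; split_ifs <;> omega

-- B's streak scan from (v0, 1, 1) relates to A's scan from (v0, lon, cur): B's longest component
-- carries max of A's longest and A's current streak.
lemma pv_scan_rel (rest : List Int) : ∀ (last lon cur : Int), 1 ≤ cur →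
    rest.foldl (fun (s : Int × Int × Int) v =>
        if v = s.1 + 1 then (v, if s.2.2 + 1 > s.2.1 then s.2.2 + 1 else s.2.1, s.2.2 + 1)
        else (v, s.2.1, 1)) (last, max lon cur, cur)
    = ((fun a : Int × Int × Int => (a.1, max a.2.1 a.2.2, a.2.2))
        (rest.foldl (fun (s : Int × Int × Int) val =>
          if val = s.1 + 1 then (val, s.2.1, s.2.2 + 1)
          else (val, if s.2.2 > s.2.1 then s.2.2 else s.2.1, 1)) (last, lon, cur))) := by
  induction rest with
  | nil => intro last lon cur h; rfl
  | cons v rest ih =>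
    intro last lon cur h
    by_cases hv : v = last + 1
    · simp only [List.foldl_cons]
      rw [if_pos hv, if_pos hv]
      have h1 : (if cur + 1 > max lon cur then cur + 1 else max lon cur) = max lon (cur + 1) := by
        rw [max_def, max_def]; split_ifs <;> omega
      rw [h1]
      exact ih v lon (cur + 1) (by omega)
    · simp only [List.foldl_cons]
      rw [if_neg hv, if_neg hv]
      rw [pv_if_max lon cur]
      have h4 := ih v (max lon cur) 1 (le_refl 1)
      rw [show max (max lon cur) 1 = max lon cur from by
        rw [max_def, max_def]; split_ifs <;> omega] at h4
      exact h4

lemma pv_scan_top (v0 : Int) (rest : List Int) :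
    (rest.foldl (fun (s : Int × Int × Int) v =>
        if v = s.1 + 1 then (v, if s.2.2 + 1 > s.2.1 then s.2.2 + 1 else s.2.1, s.2.2 + 1)
        else (v, s.2.1, 1)) (v0, 1, 1)).2.1
    = find_longest_line (v0 :: rest) := by
  have h := pv_scan_rel rest v0 0 1 (by omega)
  simp only [show max (0:Int) 1 = 1 from rfl] at h
  rw [h, find_longest_line]
  simp [pv_if_max]

-- dropping the range indices with value 0 (columns with no robots)
lemma pv_foldl_max_filter (F : Int → Int) (K : List Int) :
    ∀ (R : List Int) (b : Int), 0 ≤ b → (∀ i ∈ R, i ∉ K → F i = 0) →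
    R.foldl (fun acc i => max acc (F i)) b
      = (R.filter (fun i => decide (i ∈ K))).foldl (fun acc i => max acc (F i)) b := by
  intro R
  induction R with
  | nil => intro b _ _; rfl
  | cons i R ih =>
    intro b hb hz
    by_cases hi : i ∈ K
    · simp only [List.filter_cons, decide_eq_true hi, List.foldl_cons]
      exact ih (max b (F i)) (le_trans hb (le_max_left _ _)) (fun j hj => hz j (List.mem_cons_of_mem _ hj))
    · have h0 : F i = 0 := hz i (List.mem_cons_self) hi
      simp only [List.filter_cons, List.foldl_cons, decide_eq_false hi, h0]
      have : max b 0 = b := by omega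
      rw [this]
      exact ih b hb (fun j hj => hz j (List.mem_cons_of_mem _ hj))


-- pts-bucket of column c equals A's column list, for c in range
lemma pv_pts_filter (positions : List (List Int)) (n c : Int) (h0 : 0 ≤ c) (h1 : c < n) :
    ((((positions.filter (fun p =>
        decide (0 ≤ PySem.List.pyGetD p 1 0 ∧ PySem.List.pyGetD p 1 0 < n))).map
        (fun p => (PySem.List.pyGetD p 1 0, PySem.List.pyGetD p 0 0))).filter
        (fun q => q.1 == c)).map (fun q => q.2)) = pvColRows positions c := by
  unfold pvColRows
  rw [List.filter_map, List.map_map]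
  rw [List.filter_filter]
  have hcong := List.filter_congr (l := positions)
    (p := fun p => (((fun q : Int × Int => q.1 == c) ∘
        (fun p => (PySem.List.pyGetD p 1 0, PySem.List.pyGetD p 0 0))) p &&
        decide (0 ≤ PySem.List.pyGetD p 1 0 ∧ PySem.List.pyGetD p 1 0 < n)))
    (q := fun p => PySem.List.pyGetD p 1 0 == c)
    (fun p _ => by
      by_cases hp : PySem.List.pyGetD p 1 0 = c
      · simp only [Function.comp]; simp [hp, h0, h1]
      · simp only [Function.comp]; simp [hp])
  rw [hcong]
  rfl

theorem pv_main (positions : List (List Int)) (shape : List Int) :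
    find_longest_robot_vertical_line positions shape
      = find_longest_robot_vertical_line_alt positions shape := by
  have hA : find_longest_robot_vertical_line positions shape
      = (PySem.List.pyRange 0 (PySem.List.pyGetD shape 1 0) 1).foldl
          (fun acc i => max acc (pvF positions i)) 0 := by
    unfold find_longest_robot_vertical_line
    refine PySem.List.foldl_congr_mem _ _ _ _ (fun acc i _ => ?_)
    simp only [pvF, pvColRows]
    exact pv_if_max acc _
  set n := PySem.List.pyGetD shape 1 0 with hn
  set pts := (positions.filter (fun p =>
      decide (0 ≤ PySem.List.pyGetD p 1 0 ∧ PySem.List.pyGetD p 1 0 < n))).map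
      (fun p => (PySem.List.pyGetD p 1 0, PySem.List.pyGetD p 0 0)) with hpts
  set bk := pts.foldl (fun (d : PySem.Dict Int (List Int)) q =>
      d.modify q.1 [] (fun x => x ++ [q.2])) PySem.Dict.empty with hbk
  have hkeys : bk.keys = PySem.Set.ofList (pts.map Prod.fst) := by
    rw [hbk, PySem.Dict.keys_foldl_modify_key pts Prod.fst []
      (fun _ q => (fun x => x ++ [q.2])) PySem.Dict.empty]
    rfl
  have hnd : bk.keys.Nodup := by
    rw [hkeys]; exact PySem.Set.nodup_ofList _
  have hget : ∀ c, bk.getD c [] = (pts.filter (fun q => q.1 == c)).map (fun q => q.2) := by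
    intro c
    rw [hbk, PySem.Dict.getD_foldl_modify_append pts PySem.Dict.empty c]
    simp
  -- membership in the key set forces the column into range, with a nonempty column list
  have hmem : ∀ c ∈ bk.keys, (0 ≤ c ∧ c < n) ∧ pvColRows positions c ≠ [] := by
    intro c hc
    rw [hkeys, PySem.Set.mem_ofList] at hc
    obtain ⟨q, hq, hq1⟩ := List.mem_map.mp hc
    rw [hpts] at hq
    obtain ⟨p, hpmem, hpq⟩ := List.mem_map.mp hq
    have hpfil := List.mem_filter.mp hpmem
    have hrange : 0 ≤ PySem.List.pyGetD p 1 0 ∧ PySem.List.pyGetD p 1 0 < n :=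
      of_decide_eq_true hpfil.2
    have hcol : PySem.List.pyGetD p 1 0 = c := by rw [← hq1, ← hpq]
    refine ⟨⟨by omega, by omega⟩, ?_⟩
    have hpin : p ∈ positions.filter (fun p => PySem.List.pyGetD p 1 0 == c) :=
      List.mem_filter.mpr ⟨hpfil.1, by simp [hcol]⟩
    unfold pvColRows
    intro hnil
    rw [List.map_eq_nil_iff] at hnil
    rw [hnil] at hpin
    exact absurd hpin (List.not_mem_nil)
  -- B's fold over the bucket values is the fold of max ∘ pvF over the key list
  have hB : find_longest_robot_vertical_line_alt positions shape
      = bk.keys.foldl (fun acc c => max acc (pvF positions c)) 0 := by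
    show bk.values.foldl _ 0 = _
    rw [PySem.Dict.values_eq_map_keys bk hnd [], List.foldl_map]
    refine PySem.List.foldl_congr_mem _ _ _ _ (fun acc c hc => ?_)
    obtain ⟨⟨hc0, hc1⟩, hne⟩ := hmem c hc
    have hrows : bk.getD c [] = pvColRows positions c := by
      rw [hget c, hpts]
      exact pv_pts_filter positions n c hc0 hc1
    rw [hrows]
    rcases hs : PySem.List.sorted (pvColRows positions c) (fun x => x) false with _ | ⟨v0, rest⟩
    · exact absurd ((PySem.List.sorted_eq_nil_iff _ _ _).mp hs) hne
    · simp only []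
      rw [pv_scan_top v0 rest]
      have : find_longest_line (v0 :: rest) = pvF positions c := by
        rw [pvF, hs]
      rw [this]
      exact pv_if_max acc _
  -- columns in range but without robots contribute 0
  have hzero : ∀ i ∈ PySem.List.pyRange 0 n 1, i ∉ bk.keys → pvF positions i = 0 := by
    intro i hi hik
    have hir := PySem.List.mem_pyRange_one.mp hi
    have hcols : pvColRows positions i = [] := by
      unfold pvColRows
      rw [List.filter_eq_nil_iff.mpr ?_]
      · rfl
      · intro p hp hpi
        apply hik
        rw [hkeys, PySem.Set.mem_ofList]
        have hpi' : PySem.List.pyGetD p 1 0 = i := by simpa using hpi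
        refine List.mem_map.mpr ⟨(PySem.List.pyGetD p 1 0, PySem.List.pyGetD p 0 0), ?_, hpi'⟩
        rw [hpts]
        refine List.mem_map.mpr ⟨p, List.mem_filter.mpr ⟨hp, ?_⟩, rfl⟩
        exact decide_eq_true (by omega)
    rw [pvF, hcols]
    rfl
  -- drop the zero columns from A's range fold, then permute to the key list
  have hsub : ∀ x, x ∈ (PySem.List.pyRange 0 n 1).filter (fun i => decide (i ∈ bk.keys))
      ↔ x ∈ bk.keys := by
    intro x
    constructor
    · intro hx
      exact of_decide_eq_true (List.mem_filter.mp hx).2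
    · intro hx
      obtain ⟨⟨h0, h1⟩, _⟩ := hmem x hx
      exact List.mem_filter.mpr ⟨PySem.List.mem_pyRange_one.mpr ⟨h0, h1⟩, decide_eq_true hx⟩
  have hperm : List.Perm ((PySem.List.pyRange 0 n 1).filter (fun i => decide (i ∈ bk.keys)))
      bk.keys :=
    (List.perm_ext_iff_of_nodup ((PySem.List.nodup_pyRange_one 0 n).filter _) hnd).mpr hsub
  rw [hA, hB]
  rw [pv_foldl_max_filter (pvF positions) bk.keys (PySem.List.pyRange 0 n 1) 0 (le_refl 0) hzero]
  exact List.Perm.foldl_eq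
    (rcomm := ⟨fun a b c => by simp [max_assoc, max_comm (pvF positions b) (pvF positions c)]⟩)
    hperm 0

-- ===== VERDICT (by name: the statement is the Claim_ definition above) =====
theorem find_longest_robot_vertical_line_spec : Claim_equal_find_longest_robot_vertical_line := by
  intro positions shape _ _
  unfold Spec_find_longest_robot_vertical_line
  exact pv_main positions shape
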